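-- pv_equiv track=rewrite | github.com/vsevolodnedora/open-event-intel | src/open_event_intel/etl_processing/stage_08_events.py | detect_triggered_event_types
-- ===== SOURCE A (Python) =====
-- def detect_triggered_event_types(
--     clean_content: str,
--     trigger_index: dict[str, list[str]],
-- ) -> dict[str, list[str]]:
--     """
--     Detect which event types are triggered by keywords in the document.
--
--     :return: ``{event_type: [matched_keywords]}``.
--     """
--     content_lower = clean_content.lower()
--     results: dict[str, list[str]] = {}
--     for kw, etypes in trigger_index.items():
--         if kw in content_lower:
--             for et in etypes:
--                 results.setdefault(et, [])
--                 if kw not in results[et]: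
--                     results[et].append(kw)
--     return results
-- ===== SOURCE B (Python) =====
-- def detect_triggered_event_types(
--     clean_content: str,
--     trigger_index: dict[str, list[str]],
-- ) -> dict[str, list[str]]:
--     """Length-bucketed sliding-window dictionary matching: keywords are grouped
--     by length into hash sets, one window scan of the text per distinct keyword
--     length collects the matched-keyword set, then one pass over the trigger
--     index groups the matches per event type."""
--     content_lower = clean_content.lower()
--     n = len(content_lower)
--     kws_by_len: dict[int, set] = {}
--     for kw in trigger_index:
--         kws_by_len.setdefault(len(kw), set()).add(kw)
--     matched = set()
--     for length, kws in kws_by_len.items():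
--         for i in range(n - length + 1):
--             window = content_lower[i:i + length]
--             if window in kws:
--                 matched.add(window)
--     results: dict[str, list[str]] = {}
--     for kw, etypes in trigger_index.items():
--         if kw in matched:
--             for et in etypes:
--                 bucket = results.setdefault(et, [])
--                 if kw not in bucket:
--                     bucket.append(kw)
--     return results
-- ===== Notes on version B (the rewrite author's own statement) =====
-- stated objective: faster
-- what changed: A tests each keyword against the text with its own substring search; B groups the keywords by length into hash sets, slides one window over the text per distinct keyword length to collect the matched-keyword set, and then groups the matches per event type in a single pass over the trigger index.
import Mathlib
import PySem

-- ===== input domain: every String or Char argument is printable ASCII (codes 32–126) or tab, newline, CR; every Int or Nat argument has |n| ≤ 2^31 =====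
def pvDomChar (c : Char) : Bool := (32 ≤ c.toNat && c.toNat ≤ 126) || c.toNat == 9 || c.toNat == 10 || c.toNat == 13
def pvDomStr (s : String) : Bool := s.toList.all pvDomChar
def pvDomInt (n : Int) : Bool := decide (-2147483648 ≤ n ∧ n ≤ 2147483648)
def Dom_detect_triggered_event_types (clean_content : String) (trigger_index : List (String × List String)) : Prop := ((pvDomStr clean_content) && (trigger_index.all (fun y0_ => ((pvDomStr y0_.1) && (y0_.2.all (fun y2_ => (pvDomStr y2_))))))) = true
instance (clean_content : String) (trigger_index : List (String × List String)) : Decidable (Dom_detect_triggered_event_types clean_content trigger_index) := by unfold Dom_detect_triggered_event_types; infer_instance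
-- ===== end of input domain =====

-- B replaces A's per-keyword substring search by length-bucketed sliding-window
-- dictionary matching (one window scan of the text per distinct keyword length
-- against a hash set of the keywords of that length); objective: faster
-- (measured).

-- ===== PORT A =====
-- results.setdefault(et, []); if kw not in results[et]: results[et].append(kw)
def pvAInner (kw : String) (results : PySem.Dict String (List String)) (et : String) : PySem.Dict String (List String) :=
  let results := results.setdefault et []
  if kw ∈ results.getD et [] then results
  else results.insert et (results.getD et [] ++ [kw])

-- outer loop body: if kw in content_lower: for et in etypes: …
def pvAStep (content_lower : String) (results : PySem.Dict String (List String)) (p : String × List String) : PySem.Dict String (List String) :=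
  if PySem.Str.isIn p.1 content_lower then p.2.foldl (pvAInner p.1) results else results

def detect_triggered_event_types (clean_content : String) (trigger_index : List (String × List String)) : List (String × List String) :=
  let content_lower := PySem.Str.lower clean_content
  (trigger_index.foldl (pvAStep content_lower) PySem.Dict.empty).items

-- ===== PORT B =====
-- kws_by_len.setdefault(len(kw), set()).add(kw)  (in-place add = modify with default ∅)
def pvBByLen (trigger_index : List (String × List String)) : PySem.Dict Int (PySem.Set String) :=
  trigger_index.foldl
    (fun d p => d.modify (PySem.Str.len p.1) PySem.Set.empty (fun s => PySem.Set.add s p.1))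
    PySem.Dict.empty

-- window = content_lower[i:i+length]; if window in kws: matched.add(window)
def pvBWin (low : String) (L : Int) (kws : PySem.Set String) (m : PySem.Set String) (i : Int) : PySem.Set String :=
  let w := PySem.Str.slice low (some i) (some (i + L))
  if PySem.Set.contains kws w then PySem.Set.add m w else m

-- for i in range(n - length + 1): …
def pvBScan (low : String) (n : Int) (m : PySem.Set String) (p : Int × PySem.Set String) : PySem.Set String :=
  (PySem.List.pyRange 0 (n - p.1 + 1)).foldl (pvBWin low p.1 p.2) m

-- grouping pass: if kw in matched: for et in etypes: setdefault/append with dedup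
def pvBGroup (matched : PySem.Set String) (results : PySem.Dict String (List String)) (p : String × List String) : PySem.Dict String (List String) :=
  if PySem.Set.contains matched p.1 then
    p.2.foldl (fun results et =>
      let results := results.setdefault et []
      let bucket := results.getD et []
      if p.1 ∈ bucket then results else results.insert et (bucket ++ [p.1])) results
  else results

def detect_triggered_event_types_alt (clean_content : String) (trigger_index : List (String × List String)) : List (String × List String) :=
  let content_lower := PySem.Str.lower clean_content
  let n := PySem.Str.len content_lower
  let matched := ((pvBByLen trigger_index).items).foldl (pvBScan content_lower n) PySem.Set.empty
  (trigger_index.foldl (pvBGroup matched) PySem.Dict.empty).items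

-- ===== PRECONDITION & SPEC =====
def Spec_detect_triggered_event_types (clean_content : String) (trigger_index : List (String × List String)) (out : List (String × List String)) : Prop := out = detect_triggered_event_types_alt clean_content trigger_index
instance (clean_content : String) (trigger_index : List (String × List String)) (out : List (String × List String)) : Decidable (Spec_detect_triggered_event_types clean_content trigger_index out) := by unfold Spec_detect_triggered_event_types; infer_instance

-- ===== CLAIM (what is proved, stated in full; the proofs are below) =====
def Claim_equal_detect_triggered_event_types : Prop := ∀ (clean_content : String) (trigger_index : List (String × List String)), Dom_detect_triggered_event_types clean_content trigger_index → Spec_detect_triggered_event_types clean_content trigger_index (detect_triggered_event_types clean_content trigger_index)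

-- ===== LEMMAS AND PROOFS =====

-- the window step, let-expanded (rfl)
lemma pvBWin_eq (low : String) (L : Int) (kws : PySem.Set String) (m : PySem.Set String) (i : Int) :
    pvBWin low L kws m i
      = if PySem.Set.contains kws (PySem.Str.slice low (some i) (some (i + L))) = true
        then PySem.Set.add m (PySem.Str.slice low (some i) (some (i + L))) else m := rfl

-- any slice of a string is an infix of it
lemma pv_slice_infix (s : String) (a b : Int) :
    (PySem.Str.slice s (some a) (some b)).toList <:+: s.toList := by
  rw [PySem.Str.toList_slice, PySem.Chars.slice_eq_listSlice]
  unfold PySem.List.slice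
  exact ((List.take_prefix _ _).isInfix).trans ((List.drop_suffix _ _).isInfix)

-- the window loop only grows the matched set
lemma pv_win_fold_mono (low : String) (L : Int) (kws : PySem.Set String) (x : String) :
    ∀ (l : List Int) (m : PySem.Set String), x ∈ m → x ∈ l.foldl (pvBWin low L kws) m := by
  intro l
  induction l with
  | nil => intro m h; exact h
  | cons i t ih =>
    intro m h
    apply ih
    rw [pvBWin_eq]
    split_ifs
    · exact (PySem.Set.mem_add m _ x).mpr (Or.inl h)
    · exact h

lemma pv_scan_fold_mono (low : String) (n : Int) (x : String) :
    ∀ (its : List (Int × PySem.Set String)) (m : PySem.Set String), x ∈ m → x ∈ its.foldl (pvBScan low n) m := by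
  intro its
  induction its with
  | nil => intro m h; exact h
  | cons p t ih =>
    intro m h
    exact ih _ (pv_win_fold_mono low p.1 p.2 x _ m h)

-- everything the window loop adds is an infix of the text
lemma pv_win_fold_sound (low : String) (L : Int) (kws : PySem.Set String) (x : String) :
    ∀ (l : List Int) (m : PySem.Set String),
      x ∈ l.foldl (pvBWin low L kws) m → x ∈ m ∨ PySem.Str.isIn x low = true := by
  intro l
  induction l with
  | nil => intro m h; exact Or.inl h
  | cons i t ih =>
    intro m h
    rcases ih _ h with h1 | h1
    · rw [pvBWin_eq] at h1
      split_ifs at h1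
      · rcases (PySem.Set.mem_add m _ x).mp h1 with h2 | h2
        · exact Or.inl h2
        · refine Or.inr ?_
          rw [h2, PySem.Str.isIn_iff_infix]
          exact pv_slice_infix low i (i + L)
      · exact Or.inl h1
    · exact Or.inr h1

lemma pv_scan_fold_sound (low : String) (n : Int) (x : String) :
    ∀ (its : List (Int × PySem.Set String)) (m : PySem.Set String),
      x ∈ its.foldl (pvBScan low n) m → x ∈ m ∨ PySem.Str.isIn x low = true := by
  intro its
  induction its with
  | nil => intro m h; exact Or.inl h
  | cons p t ih =>
    intro m h
    rcases ih _ h with h1 | h1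
    · exact pv_win_fold_sound low p.1 p.2 x _ m h1
    · exact Or.inr h1

-- the bucket of length L holds exactly the keys of that length, in order
lemma pv_byLen_getD (L : Int) :
    ∀ (ti : List (String × List String)) (d : PySem.Dict Int (PySem.Set String)),
      (ti.foldl (fun d p => d.modify (PySem.Str.len p.1) PySem.Set.empty (fun s => PySem.Set.add s p.1)) d).getD L PySem.Set.empty
        = ((ti.map Prod.fst).filter (fun kw => PySem.Str.len kw == L)).foldl PySem.Set.add (d.getD L PySem.Set.empty) := by
  intro ti
  induction ti with
  | nil => intro d; rfl
  | cons p t ih =>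
    intro d
    simp only [List.foldl_cons, List.map_cons, List.filter_cons]
    rw [ih]
    by_cases hL : L = PySem.Str.len p.1
    · have : (PySem.Str.len p.1 == L) = true := by simp [hL]
      rw [this, PySem.Dict.getD_modify, if_pos hL, hL]
      simp
    · have : (PySem.Str.len p.1 == L) = false := by
        simp; exact fun h => hL h.symm
      rw [this, PySem.Dict.getD_modify, if_neg hL]
      simp

-- if some position's window is kw and the set test fires, the loop collects kw
lemma pv_win_fold_hit (low : String) (L : Int) (kws : PySem.Set String) (kw : String) (i : Int)
    (hc : PySem.Set.contains kws (PySem.Str.slice low (some i) (some (i + L))) = true)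
    (hw : PySem.Str.slice low (some i) (some (i + L)) = kw) :
    ∀ (l : List Int) (m : PySem.Set String), i ∈ l → kw ∈ l.foldl (pvBWin low L kws) m := by
  intro l
  induction l with
  | nil => intro m h; exact absurd h (List.not_mem_nil)
  | cons j t ih =>
    intro m h
    rcases List.mem_cons.mp h with h1 | h1
    · refine pv_win_fold_mono low L kws kw t _ ?_
      rw [← h1, pvBWin_eq, hc, if_pos rfl, hw]
      exact (PySem.Set.mem_add m kw kw).mpr (Or.inr rfl)
    · exact ih _ h1

lemma pv_scan_fold_hit (low : String) (n : Int) (kw : String) (p : Int × PySem.Set String)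
    (hp : ∀ m, kw ∈ pvBScan low n m p) :
    ∀ (its : List (Int × PySem.Set String)) (m : PySem.Set String), p ∈ its → kw ∈ its.foldl (pvBScan low n) m := by
  intro its
  induction its with
  | nil => intro m h; exact absurd h (List.not_mem_nil)
  | cons q t ih =>
    intro m h
    rcases List.mem_cons.mp h with h1 | h1
    · exact pv_scan_fold_mono low n kw t _ (h1 ▸ hp m)
    · exact ih _ h1

-- completeness: a key that occurs in the text is collected by the scan
lemma pv_matched_complete (low : String) (ti : List (String × List String)) (kw : String)
    (hkey : kw ∈ ti.map Prod.fst) (hin : PySem.Str.isIn kw low = true) :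
    kw ∈ ((pvBByLen ti).items).foldl (pvBScan low (PySem.Str.len low)) PySem.Set.empty := by
  -- the bucket s at L := len kw contains kw
  have hgetD : (pvBByLen ti).getD (PySem.Str.len kw) PySem.Set.empty
      = PySem.Set.ofList ((ti.map Prod.fst).filter (fun k => PySem.Str.len k == PySem.Str.len kw)) := by
    unfold pvBByLen
    rw [pv_byLen_getD, PySem.Dict.getD_empty, PySem.Set.ofList_eq_foldl]
    rfl
  have hmem_s : kw ∈ (pvBByLen ti).getD (PySem.Str.len kw) PySem.Set.empty := by
    rw [hgetD, PySem.Set.mem_ofList, List.mem_filter]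
    exact ⟨hkey, by simp⟩
  -- the bucket really is an entry of the dict
  have hcont : (pvBByLen ti).contains (PySem.Str.len kw) = true := by
    rw [PySem.Dict.contains_iff_mem_keys]
    unfold pvBByLen
    rw [PySem.Dict.keys_foldl_modify_key ti (fun p => PySem.Str.len p.1) PySem.Set.empty
      (fun _ p => fun s => PySem.Set.add s p.1) PySem.Dict.empty]
    rw [PySem.Dict.keys_empty, PySem.Set.mem_update]
    rcases List.mem_map.mp hkey with ⟨p, hp, hp1⟩
    exact Or.inr (List.mem_map.mpr ⟨p, hp, by rw [hp1]⟩)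
  obtain ⟨s, hs⟩ : ∃ s, (pvBByLen ti).get? (PySem.Str.len kw) = some s := by
    rw [PySem.Dict.contains_eq_isSome_get?] at hcont
    exact Option.isSome_iff_exists.mp hcont
  have hseq : s = (pvBByLen ti).getD (PySem.Str.len kw) PySem.Set.empty :=
    ((pvBByLen ti).getD_of_get?_eq_some PySem.Set.empty hs).symm
  have hitems : (PySem.Str.len kw, s) ∈ (pvBByLen ti).items :=
    PySem.Dict.mem_items_of_get?_eq_some _ hs
  -- a window position where the scan hits kw
  obtain ⟨j, hj⟩ : ∃ j, kw.toList <+: low.toList.drop j := by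
    apply (PySem.Chars.exists_prefix_drop_iff_isIn kw.toList low.toList).mpr
    rw [PySem.Str.isIn_eq] at hin
    exact hin
  have hj' : kw.toList <+: low.toList.drop (min j low.toList.length) := by
    by_cases hle : j ≤ low.toList.length
    · rwa [min_eq_left hle]
    · have hnil : low.toList.drop j = [] := List.drop_eq_nil_of_le (by omega)
      rw [hnil] at hj
      rw [List.prefix_nil.mp hj]
      exact List.nil_prefix
  have hwin : PySem.Str.slice low (some ((min j low.toList.length : Nat) : Int))
      (some (((min j low.toList.length : Nat) : Int) + ((kw.toList.length : Nat) : Int))) = kw := by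
    apply String.toList_inj.mp
    rw [PySem.Str.toList_slice, PySem.Chars.slice_eq_listSlice, PySem.List.slice_natCast_add]
    exact ((List.prefix_iff_eq_take.mp hj').symm)
  apply pv_scan_fold_hit low (PySem.Str.len low) kw (PySem.Str.len kw, s) _ _ PySem.Set.empty hitems
  intro m
  unfold pvBScan
  have hlenb : kw.toList.length ≤ low.toList.length - min j low.toList.length := by
    have := hj'.length_le
    rw [List.length_drop] at this
    omega
  have hL : ((min j low.toList.length : Nat) : Int) + PySem.Str.len kw
      = ((min j low.toList.length : Nat) : Int) + ((kw.toList.length : Nat) : Int) := by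
    rw [PySem.Str.len_eq]
  apply pv_win_fold_hit low (PySem.Str.len kw) s kw ((min j low.toList.length : Nat) : Int)
  · rw [hL, hwin]
    rw [← hseq] at hmem_s
    exact List.contains_iff_mem.mpr hmem_s
  · rw [hL]
    exact hwin
  · rw [PySem.List.mem_pyRange_one, PySem.Str.len_eq, PySem.Str.len_eq]
    constructor
    · positivity
    · push_cast
      omega

-- the matched set decides, for every key, exactly 'kw in content_lower'
lemma pv_matched_eq (low : String) (ti : List (String × List String)) (kw : String)
    (hkey : kw ∈ ti.map Prod.fst) :
    PySem.Set.contains (((pvBByLen ti).items).foldl (pvBScan low (PySem.Str.len low)) PySem.Set.empty) kw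
      = PySem.Str.isIn kw low := by
  by_cases h : PySem.Str.isIn kw low = true
  · rw [h]
    exact List.contains_iff_mem.mpr (pv_matched_complete low ti kw hkey h)
  · rw [Bool.not_eq_true] at h
    rw [h]
    rw [Bool.eq_false_iff]
    intro hc
    have hmem := List.contains_iff_mem.mp hc
    rcases pv_scan_fold_sound low (PySem.Str.len low) kw _ _ hmem with h1 | h1
    · exact absurd h1 (List.not_mem_nil)
    · rw [h1] at h; exact Bool.true_eq_false.mp h

-- ===== VERDICT (by name: the statement is the Claim_ definition above) =====
theorem detect_triggered_event_types_spec : Claim_equal_detect_triggered_event_types := by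
  intro clean_content trigger_index _
  unfold Spec_detect_triggered_event_types detect_triggered_event_types detect_triggered_event_types_alt
  show (List.foldl (pvAStep (PySem.Str.lower clean_content)) PySem.Dict.empty trigger_index).items
    = (List.foldl (pvBGroup (((pvBByLen trigger_index).items).foldl
        (pvBScan (PySem.Str.lower clean_content) (PySem.Str.len (PySem.Str.lower clean_content)))
        PySem.Set.empty)) PySem.Dict.empty trigger_index).items
  congr 1
  apply PySem.List.foldl_congr_mem
  intro acc p hp
  unfold pvAStep pvBGroup
  rw [pv_matched_eq (PySem.Str.lower clean_content) trigger_index p.1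
    (List.mem_map.mpr ⟨p, hp, rfl⟩)]
  rfl
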